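-- pv_equiv track=rewrite | github.com/LatencyTDH/coding-competitions | kickstart/2020c/a.py | solve
-- ===== SOURCE A (Python) =====
-- def solve(arr, k, n):
-- 	count = 0
-- 	end = n
-- 	i = 0
-- 	while i < end:
-- 		num = arr[i]
-- 		if num == k:
-- 			expected = k
-- 			while i < end and arr[i] == expected and expected > 0:
-- 				if expected == 1:
-- 					count += 1
-- 				i += 1
-- 				expected -= 1
-- 		else:
-- 			i += 1
--
-- 	return count
-- ===== SOURCE B (Python) =====
-- def solve(arr, k, n):
-- 	if k > n:
-- 		return 0
-- 	target = [k - j for j in range(k)]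
-- 	count = 0
-- 	for i in range(n):
-- 		if arr[i] == k and i + k <= n and arr[i:i+k] == target:
-- 			count += 1
-- 	return count
-- ===== Notes on version B (the rewrite author's own statement) =====
-- stated objective: simpler
-- what changed: A's forward-pointer state machine (nested while loops mutating i/expected/count) is replaced by a single scan over start positions that compares the slice arr[i:i+k] against a precomputed descending target.
import Mathlib
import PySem

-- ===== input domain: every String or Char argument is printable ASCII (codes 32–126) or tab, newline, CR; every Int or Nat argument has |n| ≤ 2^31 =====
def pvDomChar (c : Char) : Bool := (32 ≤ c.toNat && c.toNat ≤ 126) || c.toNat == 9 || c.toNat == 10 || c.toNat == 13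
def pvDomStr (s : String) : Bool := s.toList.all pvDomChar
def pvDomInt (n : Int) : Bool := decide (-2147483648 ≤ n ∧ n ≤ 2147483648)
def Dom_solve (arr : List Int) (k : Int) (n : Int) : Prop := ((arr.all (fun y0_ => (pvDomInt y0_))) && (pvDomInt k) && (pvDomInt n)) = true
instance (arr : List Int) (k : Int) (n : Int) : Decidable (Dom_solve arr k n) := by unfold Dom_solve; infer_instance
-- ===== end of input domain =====

-- B replaces A's two-nested-while state machine by a single scan that compares the
-- slice arr[i:i+k] against the precomputed descending target at each candidate start
-- (objective: simpler; same asymptotic cost on this task's inputs).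

-- ===== PORT A =====
-- inner while loop: 'while i < end and arr[i] == expected and expected > 0: …'
-- returns (i, count) after the loop
def solveInner (arr : List Int) (endN i expected count : Int) : Int × Int :=
  if h : i < endN ∧ PySem.List.pyGet? arr i = some expected ∧ expected > 0 then
    solveInner arr endN (i + 1) (expected - 1) (if expected = 1 then count + 1 else count)
  else
    (i, count)
termination_by (endN - i).toNat
decreasing_by omega

-- outer while loop: 'while i < end: …'; the 'p.1 > i' guard only makes the
-- recursion total (where it fails, the Python loops forever — excluded by Pre_)
def solveOuter (arr : List Int) (k endN i count : Int) : Int :=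
  if _h : i < endN then
    match PySem.List.pyGet? arr i with
    | none => count       -- Python raises IndexError here (excluded by Pre_)
    | some num =>
      if num = k then
        if _h2 : (solveInner arr endN i k count).1 > i then
          solveOuter arr k endN (solveInner arr endN i k count).1 (solveInner arr endN i k count).2
        else (solveInner arr endN i k count).2
      else solveOuter arr k endN (i + 1) count
  else count
termination_by (endN - i).toNat
decreasing_by all_goals omega

def solve (arr : List Int) (k : Int) (n : Int) : Int :=
  solveOuter arr k n 0 0

-- ===== PORT B =====
def solve_alt (arr : List Int) (k : Int) (n : Int) : Int :=
  if k > n then 0 else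
  let target := (PySem.List.pyRange 0 k 1).map (fun j => k - j)
  (PySem.List.pyRange 0 n 1).foldl
    (fun count i =>
      if PySem.List.pyGet? arr i = some k ∧ i + k ≤ n ∧
          PySem.List.slice arr (some i) (some (i + k)) = target
      then count + 1 else count) 0

-- ===== PRECONDITION & SPEC =====
-- Pre_ is exactly the set of inputs on which the Python A returns: n must not exceed
-- len(arr) (else IndexError), and if k ≤ 0 then k must not occur in arr[:n]
-- (else A's inner loop makes no progress and A diverges).
def Pre_solve (arr : List Int) (k : Int) (n : Int) : Prop :=
  n ≤ (arr.length : Int) ∧ (1 ≤ k ∨ ∀ x ∈ arr.take n.toNat, x ≠ k)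
instance (arr : List Int) (k : Int) (n : Int) : Decidable (Pre_solve arr k n) := by
  unfold Pre_solve; infer_instance

def pvWitness_solve : List Int × Int × Int := ([3, 2, 1, 3, 2, 1], 3, 6)

def Spec_solve (arr : List Int) (k : Int) (n : Int) (out : Int) : Prop := out = solve_alt arr k n
instance (arr : List Int) (k : Int) (n : Int) (out : Int) : Decidable (Spec_solve arr k n out) := by unfold Spec_solve; infer_instance

-- ===== CLAIM (what is proved, stated in full; the proofs are below) =====
def Claim_equal_solve : Prop := ∀ (arr : List Int) (k : Int) (n : Int), Dom_solve arr k n → Pre_solve arr k n → Spec_solve arr k n (solve arr k n)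

-- ===== LEMMAS AND PROOFS =====

-- the descending target [e, e-1, …, 1]
def descT (e : Int) : List Int := (List.range e.toNat).map (fun j : ℕ => e - (j : Int))

theorem descT_nonpos (e : Int) (h : e ≤ 0) : descT e = [] := by
  simp [descT, Int.toNat_of_nonpos h]

theorem descT_cons (e : Int) (h : 1 ≤ e) : descT e = e :: descT (e - 1) := by
  have hm : e.toNat = (e - 1).toNat + 1 := by omega
  rw [descT, hm, List.range_succ_eq_map, List.map_cons, List.map_map, descT]
  congr 1
  · simp
  · apply List.map_congr_left
    intro j _
    simp only [Function.comp_apply, Nat.succ_eq_add_one]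
    push_cast
    ring

-- length of the run the inner loop consumes, starting at i with expected value e
def runLen (arr : List Int) (n i e : Int) : ℕ :=
  if h : i < n ∧ PySem.List.pyGet? arr i = some e ∧ e > 0 then
    1 + runLen arr n (i + 1) (e - 1)
  else 0
termination_by (n - i).toNat
decreasing_by omega

theorem runLen_le (arr : List Int) (n : Int) :
    ∀ (m : ℕ) (e i : Int), e.toNat = m → runLen arr n i e ≤ m := by
  intro m
  induction m with
  | zero =>
    intro e i he
    rw [runLen, dif_neg (by rintro ⟨-, -, h3⟩; omega)]
  | succ m ih =>
    intro e i he
    rw [runLen]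
    split
    · have := ih (e - 1) (i + 1) (by omega)
      omega
    · omega

theorem runLen_add_le (arr : List Int) (n : Int) :
    ∀ (m : ℕ) (e i : Int), e.toNat = m → i ≤ n → i + (runLen arr n i e : Int) ≤ n := by
  intro m
  induction m with
  | zero =>
    intro e i he hi
    rw [runLen, dif_neg (by rintro ⟨-, -, h3⟩; omega)]
    omega
  | succ m ih =>
    intro e i he hi
    rw [runLen]
    split
    · rename_i h
      have := ih (e - 1) (i + 1) (by omega) (by omega)
      push_cast at this ⊢
      omega
    · simpa using hi

-- values inside the consumed run
theorem runLen_vals (arr : List Int) (n : Int) :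
    ∀ (m : ℕ) (e i : Int) (s : ℕ), e.toNat = m → s < runLen arr n i e →
      PySem.List.pyGet? arr (i + (s : Int)) = some (e - (s : Int)) ∧ i + (s : Int) < n := by
  intro m
  induction m with
  | zero =>
    intro e i s he hs
    rw [runLen] at hs
    split at hs
    · rename_i h
      exact absurd h.2.2 (by omega)
    · exact absurd hs (by omega)
  | succ m ih =>
    intro e i s he hs
    rw [runLen] at hs
    split at hs
    · rename_i h
      cases s with
      | zero => simpa using ⟨h.2.1, h.1⟩
      | succ s' =>
        have hrec := ih (e - 1) (i + 1) s' (by omega) (by omega)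
        have e1 : i + ((s' + 1 : ℕ) : Int) = (i + 1) + (s' : Int) := by push_cast; ring
        have e2 : e - ((s' + 1 : ℕ) : Int) = (e - 1) - (s' : Int) := by push_cast; ring
        rw [e1, e2]
        exact hrec
    · exact absurd hs (by omega)

-- inner loop = runLen characterisation
theorem solveInner_eq (arr : List Int) (n : Int) :
    ∀ (m : ℕ) (e i c : Int), e.toNat = m → 1 ≤ e →
      solveInner arr n i e c =
        (i + (runLen arr n i e : Int),
         if runLen arr n i e = e.toNat then c + 1 else c) := by
  intro m
  induction m with
  | zero =>
    intro e i c he h1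
    exact absurd h1 (by omega)
  | succ m ih =>
    intro e i c he h1
    by_cases h : i < n ∧ PySem.List.pyGet? arr i = some e ∧ e > 0
    · rw [solveInner, dif_pos h, runLen, dif_pos h]
      by_cases he1 : e = 1
      · subst he1
        rw [if_pos rfl]
        have hstop : ¬ ((i + 1) < n ∧ PySem.List.pyGet? arr (i + 1) = some ((1 : Int) - 1) ∧
            (1 : Int) - 1 > 0) := by
          rintro ⟨-, -, h3⟩; omega
        rw [solveInner, dif_neg hstop, runLen, dif_neg hstop]
        norm_num
      · rw [if_neg he1]
        rw [ih (e - 1) (i + 1) c (by omega) (by omega)]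
        simp only [Prod.mk.injEq]
        constructor
        · push_cast; ring
        · by_cases hc : runLen arr n (i + 1) (e - 1) = (e - 1).toNat
          · rw [if_pos hc, if_pos (by omega)]
          · rw [if_neg hc, if_neg (by omega)]
    · rw [solveInner, dif_neg h, runLen, dif_neg h]
      have hne : ¬ ((0 : ℕ) = e.toNat) := by omega
      simp [hne]

-- full run ↔ slice match (as drop/take)
theorem runLen_full_iff (arr : List Int) (n : Int) :
    ∀ (m : ℕ) (e i : Int), e.toNat = m → 0 ≤ e → 0 ≤ i →
      ((runLen arr n i e = m ∧ i + e ≤ n) ↔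
        ((arr.drop i.toNat).take m = descT e ∧ i + e ≤ n)) := by
  intro m
  induction m with
  | zero =>
    intro e i he h0 hi
    have he0 : e = 0 := by omega
    subst he0
    rw [runLen]
    simp [descT_nonpos]
  | succ m ih =>
    intro e i he h0 hi
    have h1 : 1 ≤ e := by omega
    rw [runLen, descT_cons e h1]
    by_cases hc : i < n ∧ PySem.List.pyGet? arr i = some e ∧ e > 0
    · rw [dif_pos hc]
      obtain ⟨hin, hgv, -⟩ := hc
      have hlen : i.toNat < arr.length := by
        by_contra hge
        rw [PySem.List.pyGet?_of_nonneg arr hi, List.getElem?_eq_none (by omega)] at hgv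
        simp at hgv
      have hget : PySem.List.pyGet? arr i = some arr[i.toNat] := by
        rw [PySem.List.pyGet?_of_nonneg arr hi]
        exact List.getElem?_eq_getElem hlen
      have hv : arr[i.toNat] = e := by
        rw [hget] at hgv; injection hgv
      have hdrop : arr.drop i.toNat = arr[i.toNat] :: arr.drop (i.toNat + 1) :=
        (List.getElem_cons_drop hlen).symm
      rw [hdrop, List.take_succ_cons, hv]
      have hnat : (i + 1).toNat = i.toNat + 1 := by omega
      have ih' := ih (e - 1) (i + 1) (by omega) (by omega) (by omega)
      rw [hnat] at ih'
      constructor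
      · rintro ⟨hrun, hle⟩
        have hrun' : runLen arr n (i + 1) (e - 1) = m := by omega
        have htl := (ih'.mp ⟨hrun', by omega⟩).1
        exact ⟨by rw [htl], hle⟩
      · rintro ⟨heq, hle⟩
        have htl : List.take m (arr.drop (i.toNat + 1)) = descT (e - 1) := by
          injection heq
        have := (ih'.mpr ⟨htl, by omega⟩).1
        exact ⟨by omega, hle⟩
    · rw [dif_neg hc]
      constructor
      · rintro ⟨hrun, -⟩
        exact absurd hrun (by omega)
      · rintro ⟨heq, hle⟩
        exfalso
        have hlen : i.toNat < arr.length := by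
          by_contra hge
          rw [List.drop_eq_nil_of_le (by omega)] at heq
          simp at heq
        have hdrop : arr.drop i.toNat = arr[i.toNat] :: arr.drop (i.toNat + 1) :=
          (List.getElem_cons_drop hlen).symm
        rw [hdrop, List.take_succ_cons] at heq
        have hv : arr[i.toNat] = e := by injection heq
        exact hc ⟨by omega,
          by rw [PySem.List.pyGet?_of_nonneg arr hi, List.getElem?_eq_getElem hlen, hv], by omega⟩

-- B's count of matches over [i, n)
def bCount (arr : List Int) (k n i : Int) : Int :=
  ((PySem.List.pyRange i n 1).map
    (fun j => if PySem.List.pyGet? arr j = some k ∧ j + k ≤ n ∧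
        PySem.List.slice arr (some j) (some (j + k)) =
          (PySem.List.pyRange 0 k 1).map (fun j => k - j)
      then (1 : Int) else 0)).sum

theorem bCount_nil (arr : List Int) (k n i : Int) (h : n ≤ i) : bCount arr k n i = 0 := by
  simp [bCount, PySem.List.pyRange_one_eq_nil h]

theorem bCount_cons (arr : List Int) (k n i : Int) (h : i < n) :
    bCount arr k n i =
      (if PySem.List.pyGet? arr i = some k ∧ i + k ≤ n ∧
          PySem.List.slice arr (some i) (some (i + k)) =
            (PySem.List.pyRange 0 k 1).map (fun j => k - j)
        then (1 : Int) else 0) + bCount arr k n (i + 1) := by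
  rw [bCount, PySem.List.pyRange_one_cons h]
  simp [bCount]

theorem foldl_ite_count_int {α : Type} (p : α → Prop) [DecidablePred p] :
    ∀ (l : List α) (a : Int),
      l.foldl (fun acc x => if p x then acc + 1 else acc) a
        = a + (l.map (fun x => if p x then (1 : Int) else 0)).sum := by
  intro l
  induction l with
  | nil => intro a; simp
  | cons x xs ih =>
    intro a
    rw [List.foldl_cons, List.map_cons, List.sum_cons, ih]
    split <;> ring

theorem bCount_zero_of_big_k (arr : List Int) (k n : Int) (h : n < k) :
    bCount arr k n 0 = 0 := by
  apply List.sum_eq_zero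
  intro x hx
  simp only [List.mem_map] at hx
  obtain ⟨j, hj, rfl⟩ := hx
  have hmem := PySem.List.mem_pyRange_one.mp hj
  rw [if_neg]
  rintro ⟨-, hle, -⟩
  omega

theorem solve_alt_eq_bCount (arr : List Int) (k n : Int) (hkn : ¬ k > n) :
    solve_alt arr k n = bCount arr k n 0 := by
  rw [solve_alt, if_neg hkn, bCount]
  rw [foldl_ite_count_int (fun i => PySem.List.pyGet? arr i = some k ∧ i + k ≤ n ∧
        PySem.List.slice arr (some i) (some (i + k)) =
          (PySem.List.pyRange 0 k 1).map (fun j => k - j))]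
  simp

-- the target list in solve_alt is descT k
theorem target_eq_descT (k : Int) :
    (PySem.List.pyRange 0 k 1).map (fun j => k - j) = descT k := by
  rw [PySem.List.pyRange_one, List.map_map, descT]
  have h0 : k - 0 = k := by ring
  rw [h0]
  apply List.map_congr_left
  intro j _
  simp

-- B's match condition at i (for 0 ≤ i, 1 ≤ k, n ≤ len) is exactly a full run
theorem match_iff_full (arr : List Int) (k n i : Int) (hi : 0 ≤ i) (hk : 1 ≤ k) (hget : PySem.List.pyGet? arr i = some k) (hin : i < n) :
    (PySem.List.pyGet? arr i = some k ∧ i + k ≤ n ∧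
        PySem.List.slice arr (some i) (some (i + k)) =
          (PySem.List.pyRange 0 k 1).map (fun j => k - j)) ↔
      runLen arr n i k = k.toNat := by
  have hslice : PySem.List.slice arr (some i) (some (i + k)) =
      (arr.drop i.toNat).take k.toNat := by
    rw [PySem.List.slice_toNat arr hi (by omega)]
    congr 1
    omega
  have hiff := runLen_full_iff arr n k.toNat k i rfl (by omega) hi
  constructor
  · rintro ⟨_, hle, hsl⟩
    rw [hslice, target_eq_descT] at hsl
    exact (hiff.mpr ⟨hsl, hle⟩).1
  · intro hfull
    have hle : i + k ≤ n := by
      have := runLen_add_le arr n k.toNat k i rfl (by omega)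
      omega
    have := (hiff.mp ⟨hfull, hle⟩).1
    refine ⟨hget, hle, ?_⟩
    rw [hslice, target_eq_descT]
    exact this

-- inside a consumed run, no later position can start a match (its value is k - s ≠ k)
theorem bCount_skip (arr : List Int) (k n : Int) (i : Int) (t : ℕ)
    (hvals : ∀ s : ℕ, s < t → PySem.List.pyGet? arr (i + (s : Int)) = some (k - (s : Int)))
    (ht : 1 ≤ t) :
    bCount arr k n (i + 1) = bCount arr k n (i + (t : Int)) := by
  have key : ∀ (d : ℕ) (u : ℕ), 1 ≤ u → u + d = t →
      bCount arr k n (i + (u : Int)) = bCount arr k n (i + (t : Int)) := by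
    intro d
    induction d with
    | zero => intro u _ hu; rw [Nat.add_zero] at hu; subst hu; rfl
    | succ d ih =>
      intro u hu1 hud
      have hut : u < t := by omega
      have hv := hvals u hut
      have hne : ¬ (PySem.List.pyGet? arr (i + (u : Int)) = some k ∧ (i + (u : Int)) + k ≤ n ∧
          PySem.List.slice arr (some (i + (u : Int))) (some ((i + (u : Int)) + k)) =
            (PySem.List.pyRange 0 k 1).map (fun j => k - j)) := by
        rintro ⟨hg, -, -⟩
        rw [hv] at hg
        have : k - (u : Int) = k := by injection hg
        omega
      by_cases hin : i + (u : Int) < n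
      · rw [bCount_cons arr k n _ hin, if_neg hne]
        have heq : i + (u : Int) + 1 = i + ((u + 1 : ℕ) : Int) := by push_cast; ring
        rw [heq, ih (u + 1) (by omega) (by omega)]
        ring
      · rw [bCount_nil arr k n _ (by omega), bCount_nil arr k n _ (by omega)]
  have h1 : i + (1 : Int) = i + ((1 : ℕ) : Int) := by push_cast; ring
  rw [h1, key (t - 1) 1 le_rfl (by omega)]

-- outer loop: adds exactly B's count over [i, n)
theorem solveOuter_eq (arr : List Int) (k n : Int) (hk : 1 ≤ k) (hn : n ≤ (arr.length : Int)) :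
    ∀ (m : ℕ) (i c : Int), (n - i).toNat = m → 0 ≤ i →
      solveOuter arr k n i c = c + bCount arr k n i := by
  intro m
  induction m using Nat.strong_induction_on with
  | _ m ih =>
    intro i c hm hi
    rw [solveOuter]
    by_cases hin : i < n
    · rw [dif_pos hin]
      have hlen : i.toNat < arr.length := by omega
      have hget : PySem.List.pyGet? arr i = some arr[i.toNat] := by
        rw [PySem.List.pyGet?_of_nonneg arr hi]
        exact List.getElem?_eq_getElem hlen
      rw [hget]
      dsimp only
      by_cases hv : arr[i.toNat] = k
      · rw [if_pos hv]
        have hgk : PySem.List.pyGet? arr i = some k := by rw [hget, hv]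
        set t := runLen arr n i k with hts
        have hinner := solveInner_eq arr n k.toNat k i c rfl hk
        have ht1 : 1 ≤ t := by
          rw [hts, runLen]
          rw [dif_pos ⟨hin, hgk, by omega⟩]
          omega
        have hit : i + (t : Int) ≤ n := runLen_add_le arr n k.toNat k i rfl (by omega)
        have htk : t ≤ k.toNat := runLen_le arr n k.toNat k i rfl
        rw [hinner]
        have hp1 : i + (t : Int) > i := by omega
        rw [dif_pos hp1]
        have hrec := ih (n - (i + t)).toNat (by omega) (i + (t : Int))
          (if t = k.toNat then c + 1 else c) rfl (by omega)
        rw [hrec]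
        -- split bCount i = head + bCount (i+1) = head + bCount (i+t)
        rw [bCount_cons arr k n i hin]
        have hvals : ∀ s : ℕ, s < t →
            PySem.List.pyGet? arr (i + (s : Int)) = some (k - (s : Int)) :=
          fun s hs => (runLen_vals arr n k.toNat k i s rfl hs).1
        rw [bCount_skip arr k n i t hvals ht1]
        have hmatch := match_iff_full arr k n i hi hk hgk hin
        by_cases hfull : t = k.toNat
        · rw [if_pos (hmatch.mpr hfull), if_pos hfull]
          ring
        · rw [if_neg (fun hc => hfull (hmatch.mp hc)), if_neg hfull]
          ring
      · rw [if_neg hv]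
        have hrec := ih (n - (i + 1)).toNat (by omega) (i + 1) c rfl (by omega)
        rw [hrec, bCount_cons arr k n i hin]
        have hne : ¬ (PySem.List.pyGet? arr i = some k ∧ i + k ≤ n ∧
            PySem.List.slice arr (some i) (some (i + k)) =
              (PySem.List.pyRange 0 k 1).map (fun j => k - j)) := by
          rintro ⟨hg, -, -⟩
          rw [hget] at hg
          exact hv (by injection hg)
        rw [if_neg hne]
        ring
    · rw [dif_neg hin, bCount_nil arr k n i (by omega)]
      ring

-- k ≤ 0 and k not in arr[:n]: both sides count nothing
theorem solveOuter_no_k (arr : List Int) (k n : Int) (hn : n ≤ (arr.length : Int))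
    (hno : ∀ x ∈ arr.take n.toNat, x ≠ k) :
    ∀ (m : ℕ) (i c : Int), (n - i).toNat = m → 0 ≤ i →
      solveOuter arr k n i c = c ∧ bCount arr k n i = 0 := by
  intro m
  induction m using Nat.strong_induction_on with
  | _ m ih =>
    intro i c hm hi
    rw [solveOuter]
    by_cases hin : i < n
    · rw [dif_pos hin]
      have hlen : i.toNat < arr.length := by omega
      have hget : PySem.List.pyGet? arr i = some arr[i.toNat] := by
        rw [PySem.List.pyGet?_of_nonneg arr hi]
        exact List.getElem?_eq_getElem hlen
      have hmem : arr[i.toNat] ∈ arr.take n.toNat := by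
        have h1 : i.toNat < n.toNat := by omega
        have h2 : i.toNat < (arr.take n.toNat).length := by
          rw [List.length_take]; omega
        have h3 : (arr.take n.toNat)[i.toNat] = arr[i.toNat] := List.getElem_take
        rw [← h3]
        exact List.getElem_mem h2
      have hv : arr[i.toNat] ≠ k := hno _ hmem
      rw [hget]
      dsimp only
      rw [if_neg hv]
      have hrec := ih (n - (i + 1)).toNat (by omega) (i + 1) c rfl (by omega)
      refine ⟨hrec.1, ?_⟩
      rw [bCount_cons arr k n i hin]
      have hne : ¬ (PySem.List.pyGet? arr i = some k ∧ i + k ≤ n ∧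
          PySem.List.slice arr (some i) (some (i + k)) =
            (PySem.List.pyRange 0 k 1).map (fun j => k - j)) := by
        rintro ⟨hg, -, -⟩
        rw [hget] at hg
        exact hv (by injection hg)
      rw [if_neg hne, hrec.2]
      ring
    · rw [dif_neg hin]
      exact ⟨rfl, bCount_nil arr k n i (by omega)⟩

-- ===== VERDICT (by name: the statement is the Claim_ definition above) =====
theorem solve_spec : Claim_equal_solve := by
  intro arr k n _ hpre
  obtain ⟨hn, hk⟩ := hpre
  unfold Spec_solve solve
  rcases hk with hk | hno
  · rw [solveOuter_eq arr k n hk hn (n - 0).toNat 0 0 rfl le_rfl]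
    by_cases hkn : k > n
    · rw [bCount_zero_of_big_k arr k n hkn, solve_alt, if_pos hkn]
      ring
    · rw [solve_alt_eq_bCount arr k n hkn]
      ring
  · have h0 := solveOuter_no_k arr k n hn hno (n - 0).toNat 0 0 rfl le_rfl
    rw [h0.1]
    by_cases hkn : k > n
    · rw [solve_alt, if_pos hkn]
    · rw [solve_alt_eq_bCount arr k n hkn, h0.2]
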